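-- pv_equiv track=rewrite | github.com/tcjacker/Iruka-Virtual-File-System | iruka_vfs/integrations/agent/path_guidance.py | _build_unique_filename_index
-- ===== SOURCE A (Python) =====
-- BOOTSTRAP_MAX_UNIQUE_HINTS = 12
--
-- def _build_unique_filename_index(ranked_paths: list[str]) -> dict[str, str]:
--     basename_map: dict[str, list[str]] = {}
--     for path in ranked_paths:
--         basename = path.rstrip("/").split("/")[-1]
--         basename_map.setdefault(basename, []).append(path)
--     unique_name_paths = [
--         (name, paths[0])
--         for name, paths in sorted(basename_map.items())
--         if len(paths) == 1
--     ]
--     return dict(unique_name_paths[:BOOTSTRAP_MAX_UNIQUE_HINTS])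
-- ===== SOURCE B (Python) =====
-- BOOTSTRAP_MAX_UNIQUE_HINTS = 12
--
-- def _build_unique_filename_index(ranked_paths: list[str]) -> dict[str, str]:
--     # sort (basename, path) pairs by basename, then emit heads of singleton runs
--     pairs = [(p.rstrip("/").split("/")[-1], p) for p in ranked_paths]
--     pairs.sort(key=lambda t: t[0])
--     result = []
--     rest = pairs
--     while rest and len(result) < BOOTSTRAP_MAX_UNIQUE_HINTS:
--         name = rest[0][0]
--         k = 1
--         while k < len(rest) and rest[k][0] == name:
--             k += 1
--         if k == 1:
--             result.append(rest[0])
--         rest = rest[k:]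
--     return dict(result)
-- ===== Notes on version B (the rewrite author's own statement) =====
-- stated objective: alternative
-- what changed: Replaces the basename->list-of-paths dict plus sorted(items) filtering with a sort of all (basename, path) pairs followed by a linear adjacency scan that emits heads of singleton runs, capped at 12.
import Mathlib
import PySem

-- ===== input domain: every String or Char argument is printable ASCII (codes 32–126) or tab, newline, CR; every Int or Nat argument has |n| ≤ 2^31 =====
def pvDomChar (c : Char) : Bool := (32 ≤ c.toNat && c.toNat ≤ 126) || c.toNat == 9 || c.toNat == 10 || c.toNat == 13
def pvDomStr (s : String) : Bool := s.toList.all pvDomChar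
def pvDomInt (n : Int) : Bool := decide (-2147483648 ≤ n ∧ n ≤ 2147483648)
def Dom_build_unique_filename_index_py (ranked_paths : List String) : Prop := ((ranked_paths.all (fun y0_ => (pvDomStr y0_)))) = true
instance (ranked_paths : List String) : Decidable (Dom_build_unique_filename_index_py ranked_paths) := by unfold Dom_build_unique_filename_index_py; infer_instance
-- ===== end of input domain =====

-- B replaces A's basename->paths dict + sorted(items) filter by a sort of (basename, path)
-- pairs followed by a linear singleton-run scan (objective: alternative, same result).

-- ===== PORT A =====
-- path.rstrip("/").split("/")[-1]  (shared by both Pythons verbatim):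
-- rstrip("/") strips only the character '/', done here via reverse/dropWhile (exact);
-- split("/") never returns an empty list, so [-1] is the last element (getLastD is exact).
def pyBasename (p : String) : String :=
  let t := String.ofList ((p.toList.reverse.dropWhile (fun c => c == '/')).reverse)
  (((PySem.Str.split? t "/").getD []).getLastD "")

def build_unique_filename_index_py (ranked_paths : List String) : List (String × String) :=
  -- basename_map.setdefault(b, []).append(path)  ==  d.modify b [] (· ++ [path])
  let basename_map : PySem.Dict String (List String) :=
    ranked_paths.foldl (fun d path => d.modify (pyBasename path) [] (fun l => l ++ [path])) PySem.Dict.empty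
  -- sorted(basename_map.items()): dict keys are distinct, so Python's tuple comparison
  -- never reaches the second component; sorting by the first component is exact here
  let items := PySem.List.sorted basename_map.items (fun x => x.1)
  let unique_name_paths :=
    (items.filter (fun x => x.2.length == 1)).map (fun x => (x.1, PySem.List.pyGetD x.2 0 ""))
  (PySem.Dict.ofList (unique_name_paths.take 12)).items

-- ===== PORT B =====
-- the outer while loop of Source B: rest is the unprocessed suffix of the sorted pair list;
-- the inner while (k counting the run) is takeWhile/dropWhile of equal basenames
def runScanB (rest : List (String × String)) (result : List (String × String)) : List (String × String) :=
  match rest with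
  | [] => result
  | (name, p) :: tl =>
    if result.length < 12 then
      let run := tl.takeWhile (fun q => q.1 == name)
      let rest' := tl.dropWhile (fun q => q.1 == name)
      if run.isEmpty then runScanB rest' (result ++ [(name, p)])
      else runScanB rest' result
    else result
termination_by rest.length
decreasing_by
  all_goals
    simp only [List.length_cons]
    exact Nat.lt_succ_of_le (List.length_dropWhile_le _ _)

def build_unique_filename_index_py_alt (ranked_paths : List String) : List (String × String) :=
  let pairs := ranked_paths.map (fun p => (pyBasename p, p))
  let sortedPairs := PySem.List.sorted pairs (fun t => t.1)
  (PySem.Dict.ofList (runScanB sortedPairs [])).items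

-- ===== PRECONDITION & SPEC =====
def Spec_build_unique_filename_index_py (ranked_paths : List String) (out : List (String × String)) : Prop := out = build_unique_filename_index_py_alt ranked_paths
instance (ranked_paths : List String) (out : List (String × String)) : Decidable (Spec_build_unique_filename_index_py ranked_paths out) := by unfold Spec_build_unique_filename_index_py; infer_instance

-- ===== CLAIM (what is proved, stated in full; the proofs are below) =====
def Claim_equal_build_unique_filename_index_py : Prop := ∀ (ranked_paths : List String), Dom_build_unique_filename_index_py ranked_paths → Spec_build_unique_filename_index_py ranked_paths (build_unique_filename_index_py ranked_paths)

-- ===== LEMMAS AND PROOFS =====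

-- first-occurrence dedup with an explicit seen accumulator (proof-side device)
def fdedupGo : List String → List String → List String
  | [], _ => []
  | x :: l, seen => if x ∈ seen then fdedupGo l seen else x :: fdedupGo l (x :: seen)

def fdedup (l : List String) : List String := fdedupGo l []

-- the uncapped run scan: heads of singleton basename-runs
def runsU : List (String × String) → List (String × String)
  | [] => []
  | (b, p) :: tl =>
    let t := tl.dropWhile (fun q => q.1 == b)
    if (tl.takeWhile (fun q => q.1 == b)).isEmpty then (b, p) :: runsU t else runsU t
termination_by l => l.length
decreasing_by
  all_goals
    simp only [List.length_cons]
    exact Nat.lt_succ_of_le (List.length_dropWhile_le _ _)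

theorem runScanB_eq_runsU (s acc : List (String × String)) :
    runScanB s acc = acc ++ (runsU s).take (12 - acc.length) := by
  induction s, acc using runScanB.induct with
  | case1 acc => simp [runScanB, runsU]
  | case2 acc name p tl hlt run rest2 hrun ih =>
    have hr : (List.takeWhile (fun q => q.1 == name) tl).isEmpty = true := hrun
    rw [runScanB, runsU.eq_def]
    simp only [hlt, if_pos, hr]
    rw [ih]
    have h12 : 12 - acc.length = (12 - (acc ++ [(name, p)]).length) + 1 := by
      simp only [List.length_append, List.length_cons, List.length_nil]; omega
    rw [h12, List.take_succ_cons, List.append_assoc]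
    rfl
  | case3 acc name p tl hlt run rest2 hrun ih =>
    have hr : (List.takeWhile (fun q => q.1 == name) tl).isEmpty = false :=
      eq_false_of_ne_true hrun
    rw [runScanB, runsU.eq_def]
    simp only [hlt, if_pos, hr, Bool.false_eq_true, if_false]
    exact ih
  | case4 acc name p tl hge =>
    rw [runScanB]
    have h0 : 12 - acc.length = 0 := by omega
    simp [hge, h0]

theorem mem_fdedupGo {a : String} (l seen : List String) :
    a ∈ fdedupGo l seen ↔ a ∈ l ∧ a ∉ seen := by
  induction l generalizing seen with
  | nil => simp [fdedupGo]
  | cons x l ih =>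
    rw [fdedupGo]
    by_cases hx : x ∈ seen
    · rw [if_pos hx, ih]
      constructor
      · rintro ⟨h1, h2⟩; exact ⟨List.mem_cons_of_mem _ h1, h2⟩
      · rintro ⟨h1, h2⟩
        rcases List.mem_cons.mp h1 with h | h
        · exact absurd (h ▸ hx) h2
        · exact ⟨h, h2⟩
    · rw [if_neg hx]
      by_cases hax : a = x
      · subst hax; simp [hx]
      · simp only [List.mem_cons, hax, false_or, ih, List.mem_cons]

theorem sublist_fdedupGo (l : List String) : ∀ seen, List.Sublist (fdedupGo l seen) l := by
  induction l with
  | nil => intro seen; simp [fdedupGo]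
  | cons x l ih =>
    intro seen
    rw [fdedupGo]
    by_cases hx : x ∈ seen
    · rw [if_pos hx]; exact (ih seen).trans (List.sublist_cons_self x l)
    · rw [if_neg hx]; exact List.Sublist.cons₂ x (ih (x :: seen))

theorem nodup_fdedupGo (l : List String) : ∀ seen, (fdedupGo l seen).Nodup := by
  induction l with
  | nil => intro seen; simp [fdedupGo]
  | cons x l ih =>
    intro seen
    rw [fdedupGo]
    by_cases hx : x ∈ seen
    · rw [if_pos hx]; exact ih seen
    · rw [if_neg hx]
      refine List.nodup_cons.mpr ⟨?_, ih _⟩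
      intro hmem
      exact ((mem_fdedupGo _ _).mp hmem).2 (List.mem_cons_self)

theorem fdedupGo_congr (l : List String) : ∀ s1 s2, (∀ a ∈ l, a ∈ s1 ↔ a ∈ s2) →
    fdedupGo l s1 = fdedupGo l s2 := by
  induction l with
  | nil => intro _ _ _; rfl
  | cons x l ih =>
    intro s1 s2 h
    rw [fdedupGo, fdedupGo]
    have hx' := h x List.mem_cons_self
    by_cases hx : x ∈ s1
    · rw [if_pos hx, if_pos (hx'.mp hx)]
      exact ih _ _ (fun a ha => h a (List.mem_cons_of_mem _ ha))
    · rw [if_neg hx, if_neg (fun c => hx (hx'.mpr c))]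
      refine congrArg (x :: ·) (ih _ _ ?_)
      intro a ha; simp only [List.mem_cons]
      exact or_congr Iff.rfl (h a (List.mem_cons_of_mem _ ha))

theorem fdedupGo_skip (run : List String) (t seen : List String)
    (h : ∀ a ∈ run, a ∈ seen) : fdedupGo (run ++ t) seen = fdedupGo t seen := by
  induction run with
  | nil => rfl
  | cons x run ih =>
    rw [List.cons_append, fdedupGo, if_pos (h x List.mem_cons_self)]
    exact ih (fun a ha => h a (List.mem_cons_of_mem _ ha))

theorem mem_fdedup {a : String} {l : List String} : a ∈ fdedup l ↔ a ∈ l := by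
  rw [fdedup, mem_fdedupGo]; simp

theorem nodup_fdedup (l : List String) : (fdedup l).Nodup := nodup_fdedupGo l []

theorem sublist_fdedup (l : List String) : List.Sublist (fdedup l) l := sublist_fdedupGo l []

-- sorted tails: every element of the dropWhile suffix has a strictly larger name,
-- every element of the takeWhile prefix has the same name
theorem run_split (tl : List (String × String)) (b : String)
    (hp : tl.Pairwise (fun a c => a.1 ≤ c.1)) (hb : ∀ q ∈ tl, b ≤ q.1) :
    (∀ q ∈ tl.dropWhile (fun q => q.1 == b), q.1 ≠ b) ∧
    (∀ q ∈ tl.takeWhile (fun q => q.1 == b), q.1 = b) := by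
  constructor
  · induction tl with
    | nil => intro q hq; simp at hq
    | cons x tl ih =>
      rw [List.dropWhile_cons]
      by_cases hx : (x.1 == b) = true
      · rw [if_pos hx]
        exact ih (List.Pairwise.sublist (List.sublist_cons_self _ _) hp)
          (fun q hq => hb q (List.mem_cons_of_mem _ hq))
      · rw [if_neg (by simpa using hx)]
        intro q hq
        rcases List.mem_cons.mp hq with h | h
        · subst h; simpa using hx
        · have hxq : x.1 ≤ q.1 := (List.pairwise_cons.mp hp).1 q h
          have hbx : b ≤ x.1 := hb x List.mem_cons_self
          have hne : x.1 ≠ b := by simpa using hx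
          intro hqb
          exact hne (le_antisymm (hqb ▸ hxq) hbx)
  · intro q hq
    have := List.mem_takeWhile_imp hq
    simpa using this

theorem filter_of_run (tl : List (String × String)) (b : String)
    (hp : tl.Pairwise (fun a c => a.1 ≤ c.1)) (hb : ∀ q ∈ tl, b ≤ q.1) :
    tl.filter (fun q => q.1 == b) = tl.takeWhile (fun q => q.1 == b) := by
  obtain ⟨hd, ht⟩ := run_split tl b hp hb
  conv_lhs => rw [← List.takeWhile_append_dropWhile (p := fun q => q.1 == b) (l := tl)]
  rw [List.filter_append]
  rw [List.filter_eq_self.mpr (fun q hq => by simpa using ht q hq)]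
  rw [List.filter_eq_nil_iff.mpr (fun q hq => by simpa using hd q hq)]
  simp


-- shared facts for one step of the run decomposition
theorem runsU_step_facts (b p : String) (tl : List (String × String))
    (hs : ((b, p) :: tl).Pairwise (fun a c => a.1 ≤ c.1)) :
    (tl.filter (fun q => q.1 == b) = tl.takeWhile (fun q => q.1 == b)) ∧
    (∀ q ∈ tl.dropWhile (fun q => q.1 == b), q.1 ≠ b) ∧
    (∀ q ∈ tl.takeWhile (fun q => q.1 == b), q.1 = b) ∧
    tl.Pairwise (fun a c => a.1 ≤ c.1) ∧
    (tl.dropWhile (fun q => q.1 == b)).Pairwise (fun a c => a.1 ≤ c.1) := by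
  have hp : tl.Pairwise (fun a c => a.1 ≤ c.1) := (List.pairwise_cons.mp hs).2
  have hb : ∀ q ∈ tl, b ≤ q.1 := (List.pairwise_cons.mp hs).1
  obtain ⟨hd, ht⟩ := run_split tl b hp hb
  exact ⟨filter_of_run tl b hp hb, hd, ht,
    hp, List.Pairwise.sublist (List.dropWhile_sublist _) hp⟩

-- after the head run, the name list dedups to b :: (dedup of the rest)
theorem fdedup_step (b p : String) (tl : List (String × String))
    (hd : ∀ q ∈ tl.dropWhile (fun q => q.1 == b), q.1 ≠ b)
    (ht : ∀ q ∈ tl.takeWhile (fun q => q.1 == b), q.1 = b) :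
    fdedup (((b, p) :: tl).map Prod.fst)
      = b :: fdedup ((tl.dropWhile (fun q => q.1 == b)).map Prod.fst) := by
  rw [List.map_cons, fdedup, fdedupGo, if_neg (by simp)]
  congr 1
  conv_lhs => rw [← List.takeWhile_append_dropWhile (p := fun q => q.1 == b) (l := tl)]
  rw [List.map_append, fdedupGo_skip _ _ _
    (by intro a ha
        obtain ⟨q, hq, rfl⟩ := List.mem_map.mp ha
        simp [ht q hq])]
  rw [fdedup]
  refine fdedupGo_congr _ _ _ ?_
  intro a ha
  obtain ⟨q, hq, rfl⟩ := List.mem_map.mp ha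
  simp [hd q hq]

theorem filter_other (b p : String) (tl : List (String × String)) (c : String)
    (ht : ∀ q ∈ tl.takeWhile (fun q => q.1 == b), q.1 = b) (hcb : c ≠ b) :
    ((b, p) :: tl).filter (fun r => r.1 == c)
      = (tl.dropWhile (fun r => r.1 == b)).filter (fun r => r.1 == c) := by
  rw [List.filter_cons_of_neg (by simp [Ne.symm hcb])]
  conv_lhs => rw [← List.takeWhile_append_dropWhile (p := fun r => r.1 == b) (l := tl)]
  rw [List.filter_append,
    List.filter_eq_nil_iff.mpr (fun r hr => by simp [ht r hr, Ne.symm hcb]),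
    List.nil_append]

theorem runsU_step_true (b p : String) (tl : List (String × String))
    (htake : (tl.takeWhile (fun q => q.1 == b)).isEmpty = true)
    (ih : (tl.dropWhile (fun q => q.1 == b)).Pairwise (fun a c => a.1 ≤ c.1) →
      runsU (tl.dropWhile (fun q => q.1 == b))
        = (fdedup ((tl.dropWhile (fun q => q.1 == b)).map Prod.fst)).filterMap
          (fun c => match (tl.dropWhile (fun q => q.1 == b)).filter (fun q => q.1 == c) with
                    | [x] => some x
                    | _ => none))
    (hs : ((b, p) :: tl).Pairwise (fun a c => a.1 ≤ c.1)) :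
    runsU ((b, p) :: tl) = (fdedup (((b, p) :: tl).map Prod.fst)).filterMap
      (fun c => match ((b, p) :: tl).filter (fun q => q.1 == c) with
                | [x] => some x
                | _ => none) := by
  obtain ⟨hfil, hd, ht, hp, hpd⟩ := runsU_step_facts b p tl hs
  have hrun : tl.takeWhile (fun q => q.1 == b) = [] := List.isEmpty_iff.mp htake
  rw [runsU.eq_def]
  simp only [htake, if_true]
  rw [fdedup_step b p tl hd ht, List.filterMap_cons, ih hpd]
  have hhead : ((b, p) :: tl).filter (fun q => q.1 == b) = [(b, p)] := by
    rw [List.filter_cons_of_pos (by simp), hfil, hrun]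
  rw [hhead]
  congr 1
  refine List.filterMap_congr ?_
  intro c hc
  have hct : c ∈ (tl.dropWhile (fun q => q.1 == b)).map Prod.fst := mem_fdedup.mp hc
  obtain ⟨q, hq, rfl⟩ := List.mem_map.mp hct
  have hcb : q.1 ≠ b := hd q hq
  rw [filter_other b p tl q.1 ht hcb]

theorem runsU_step_false (b p : String) (tl : List (String × String))
    (htake : (tl.takeWhile (fun q => q.1 == b)).isEmpty = false)
    (ih : (tl.dropWhile (fun q => q.1 == b)).Pairwise (fun a c => a.1 ≤ c.1) →
      runsU (tl.dropWhile (fun q => q.1 == b))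
        = (fdedup ((tl.dropWhile (fun q => q.1 == b)).map Prod.fst)).filterMap
          (fun c => match (tl.dropWhile (fun q => q.1 == b)).filter (fun q => q.1 == c) with
                    | [x] => some x
                    | _ => none))
    (hs : ((b, p) :: tl).Pairwise (fun a c => a.1 ≤ c.1)) :
    runsU ((b, p) :: tl) = (fdedup (((b, p) :: tl).map Prod.fst)).filterMap
      (fun c => match ((b, p) :: tl).filter (fun q => q.1 == c) with
                | [x] => some x
                | _ => none) := by
  obtain ⟨hfil, hd, ht, hp, hpd⟩ := runsU_step_facts b p tl hs
  obtain ⟨r0, rrest, hrun⟩ : ∃ r0 rrest, tl.takeWhile (fun q => q.1 == b) = r0 :: rrest := by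
    cases h : tl.takeWhile (fun q => q.1 == b) with
    | nil => rw [h] at htake; simp at htake
    | cons r0 rrest => exact ⟨r0, rrest, rfl⟩
  rw [runsU.eq_def]
  simp only [htake, Bool.false_eq_true, if_false]
  rw [fdedup_step b p tl hd ht, List.filterMap_cons, ih hpd]
  have hhead : ((b, p) :: tl).filter (fun q => q.1 == b) = (b, p) :: r0 :: rrest := by
    rw [List.filter_cons_of_pos (by simp), hfil, hrun]
  rw [hhead]
  have hnone : (match (b, p) :: r0 :: rrest with
      | [x] => some x
      | _ => (none : Option (String × String))) = none := rfl
  rw [hnone]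
  refine (List.filterMap_congr ?_).symm
  intro c hc
  have hct : c ∈ (tl.dropWhile (fun q => q.1 == b)).map Prod.fst := mem_fdedup.mp hc
  obtain ⟨q, hq, rfl⟩ := List.mem_map.mp hct
  have hcb : q.1 ≠ b := hd q hq
  rw [filter_other b p tl q.1 ht hcb]

-- the run decomposition of a list sorted (weakly) by first component
theorem runsU_eq_filterMap (s : List (String × String))
    (hs : s.Pairwise (fun a c => a.1 ≤ c.1)) :
    runsU s = (fdedup (s.map Prod.fst)).filterMap
      (fun b => match s.filter (fun q => q.1 == b) with
                | [x] => some x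
                | _ => none) := by
  induction s using runsU.induct with
  | case1 => rw [runsU]; rfl
  | case2 b p tl t htake ih =>
    exact runsU_step_true b p tl htake (fun h => ih h) hs
  | case3 b p tl t htake ih =>
    exact runsU_step_false b p tl (eq_false_of_ne_true htake) (fun h => ih h) hs

theorem filter_map_map_eq_filterMap {α β γ : Type} (N : List α) (f : α → β) (p : β → Bool) (g : β → γ) :
    ((N.map f).filter p).map g = N.filterMap (fun a => if p (f a) then some (g (f a)) else none) := by
  induction N with
  | nil => rfl
  | cons x N ih =>
    simp only [List.map_cons, List.filter_cons, List.filterMap_cons]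
    by_cases hx : p (f x) = true
    · simp only [hx, if_true, List.map_cons, ih]
    · rw [eq_false_of_ne_true hx]
      simp [ih]

theorem pairwise_lt_of_pairwise_le_nodup {l : List String}
    (h1 : l.Pairwise (· ≤ ·)) (h2 : l.Nodup) : l.Pairwise (· < ·) :=
  (h1.and h2).imp (fun h => lt_of_le_of_ne h.1 h.2)

theorem main_list_eq (ranked : List String) :
    (((PySem.List.sorted
        (ranked.foldl (fun d path => d.modify (pyBasename path) [] (fun l => l ++ [path]))
          PySem.Dict.empty).items (fun x => x.1)).filter
        (fun x => x.2.length == 1)).map (fun x => (x.1, PySem.List.pyGetD x.2 0 ""))).take 12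
    = runScanB (PySem.List.sorted (ranked.map (fun p => (pyBasename p, p))) (fun t => t.1)) [] := by
  set D := ranked.foldl (fun d path => d.modify (pyBasename path) [] (fun l => l ++ [path]))
    PySem.Dict.empty with hD
  set pairs := ranked.map (fun p => (pyBasename p, p)) with hpairs
  set s := PySem.List.sorted pairs (fun t => t.1) with hsdef
  have hKnd : D.keys.Nodup := by
    refine PySem.Dict.nodup_keys_foldl_modify_key ranked pyBasename []
      (fun _ path l => l ++ [path]) PySem.Dict.empty ?_
    rw [PySem.Dict.keys_empty]; exact List.nodup_nil
  have hKeys : D.keys = PySem.Set.ofList (ranked.map pyBasename) := by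
    rw [hD, PySem.Dict.keys_foldl_modify_key ranked pyBasename [] (fun _ path l => l ++ [path]),
      PySem.Dict.keys_empty, PySem.Set.update_nil_left]
  have hmapfst : pairs.map Prod.fst = ranked.map pyBasename := by
    rw [hpairs, List.map_map]; rfl
  have hG : ∀ c, D.getD c [] = (pairs.filter (fun q => q.1 == c)).map Prod.snd := by
    intro c
    have hfold : D = pairs.foldl (fun d q => d.modify q.1 [] (fun l => l ++ [q.2]))
        PySem.Dict.empty := by
      rw [hD, hpairs, List.foldl_map]
    rw [hfold, PySem.Dict.getD_foldl_modify_append, PySem.Dict.getD_empty, List.nil_append]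
  have hsp : s.Pairwise (fun a c => a.1 ≤ c.1) := PySem.List.sorted_pairwise pairs (fun t => t.1)
  have hperm : s.Perm pairs := PySem.List.sorted_perm pairs (fun t => t.1) false
  have hNnd : (fdedup (s.map Prod.fst)).Nodup := nodup_fdedup _
  have hNle : (fdedup (s.map Prod.fst)).Pairwise (· ≤ ·) :=
    List.Pairwise.sublist (sublist_fdedup _) (hsp.map Prod.fst (fun _ _ h => h))
  have hNlt : (fdedup (s.map Prod.fst)).Pairwise (· < ·) :=
    pairwise_lt_of_pairwise_le_nodup hNle hNnd
  have hNmem : ∀ a, a ∈ fdedup (s.map Prod.fst) ↔ a ∈ D.keys := by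
    intro a
    rw [mem_fdedup, hKeys, ← hmapfst, PySem.Set.mem_ofList]
    exact (hperm.map Prod.fst).mem_iff
  have hsortK : PySem.List.sorted D.keys (fun x => x) = fdedup (s.map Prod.fst) :=
    PySem.List.sorted_eq_of_perm_of_pairwise_lt D.keys _ (fun x => x)
      ((List.perm_ext_iff_of_nodup hNnd hKnd).mpr hNmem) hNlt
  have hitems : D.items = D.keys.map (fun c => (c, D.getD c [])) :=
    PySem.Dict.items_eq_map_keys D hKnd []
  have hsortItems : PySem.List.sorted D.items (fun x => x.1)
      = (fdedup (s.map Prod.fst)).map (fun c => (c, D.getD c [])) := by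
    refine PySem.List.sorted_eq_of_perm_of_pairwise_lt D.items _ (fun x => x.1) ?_ ?_
    · rw [hitems, ← hsortK]
      exact (PySem.List.sorted_perm D.keys (fun x => x) false).map _
    · exact hNlt.map _ (fun a b h => h)
  rw [hsortItems, filter_map_map_eq_filterMap, runScanB_eq_runsU,
    runsU_eq_filterMap s hsp]
  simp only [List.length_nil, Nat.sub_zero, List.nil_append]
  congr 1
  refine List.filterMap_congr ?_
  intro c hc
  have hGc := hG c
  have hpermF : (s.filter (fun q => q.1 == c)).Perm (pairs.filter (fun q => q.1 == c)) :=
    hperm.filter _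
  by_cases h1 : (pairs.filter (fun q => q.1 == c)).length = 1
  · obtain ⟨x, hx⟩ := List.length_eq_one_iff.mp h1
    have hxmem : x ∈ pairs.filter (fun q => q.1 == c) := by rw [hx]; exact List.mem_singleton.mpr rfl
    have hx1 : x.1 = c := by
      have := (List.mem_filter.mp hxmem).2
      simpa using this
    have hsf : s.filter (fun q => q.1 == c) = [x] := List.perm_singleton.mp (hx ▸ hpermF)
    rw [hsf, hGc, hx]
    simp only [List.map_cons, List.map_nil, List.length_cons, List.length_nil]
    rw [if_pos (by simp)]
    have : PySem.List.pyGetD [x.2] 0 "" = x.2 := PySem.List.pyGetD_zero_cons x.2 [] ""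
    rw [this]
    have : (c, x.2) = x := by rw [← hx1]
    rw [this]
  · have hlenG : (D.getD c []).length ≠ 1 := by
      rw [hGc, List.length_map]; exact h1
    have hlens : (s.filter (fun q => q.1 == c)).length ≠ 1 := by
      rw [hpermF.length_eq]; exact h1
    rw [if_neg (by simpa using hlenG)]
    rcases hsf' : List.filter (fun q => q.1 == c) s with _ | ⟨x, _ | ⟨y, r⟩⟩
    · rw [hsf']
    · rw [hsf'] at hlens; simp at hlens
    · rw [hsf']

theorem build_unique_filename_index_py_spec' :
    ∀ ranked_paths, build_unique_filename_index_py ranked_paths = build_unique_filename_index_py_alt ranked_paths := by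
  intro ranked
  simp only [build_unique_filename_index_py, build_unique_filename_index_py_alt]
  rw [main_list_eq]

-- ===== VERDICT (by name: the statement is the Claim_ definition above) =====
theorem build_unique_filename_index_py_spec : Claim_equal_build_unique_filename_index_py := by
  intro ranked_paths _
  unfold Spec_build_unique_filename_index_py
  exact build_unique_filename_index_py_spec' ranked_paths
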